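-- pv_equiv track=rewrite | github.com/leonardo-blas/psychological-steering | replication/scripts/sweeping_utils.py | layer_group_label
-- ===== SOURCE A (Python) =====
-- def layer_group_label(layers):
--     if not layers:
--         return "empty"
--     layers_sorted = sorted(set(layers))
--     segments = []
--     start = layers_sorted[0]
--     prev = layers_sorted[0]
--     for L in layers_sorted[1:]:
--         if L == prev + 1:
--             prev = L
--         else:
--             segments.append(f"{start}" if start == prev else f"{start}to{prev}")
--             start = L
--             prev = L
--     segments.append(f"{start}" if start == prev else f"{start}to{prev}")
--     return "_".join(segments)
-- ===== SOURCE B (Python) =====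
-- def layer_group_label(layers):
--     if not layers:
--         return "empty"
--     s = set(layers)
--     vals = sorted(s)
--     starts = [v for v in vals if v - 1 not in s]
--     ends = [v for v in vals if v + 1 not in s]
--     return "_".join(f"{a}" if a == b else f"{a}to{b}" for a, b in zip(starts, ends))
-- ===== Notes on version B (the rewrite author's own statement) =====
-- stated objective: alternative
-- what changed: Instead of A's stateful linear merge scan carrying (segments, start, prev), B characterises run boundaries by set membership: a value starts a run iff v-1 is not in the set and ends one iff v+1 is not, so two independent filters give the starts and ends, which are zipped and formatted.
import Mathlib
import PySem

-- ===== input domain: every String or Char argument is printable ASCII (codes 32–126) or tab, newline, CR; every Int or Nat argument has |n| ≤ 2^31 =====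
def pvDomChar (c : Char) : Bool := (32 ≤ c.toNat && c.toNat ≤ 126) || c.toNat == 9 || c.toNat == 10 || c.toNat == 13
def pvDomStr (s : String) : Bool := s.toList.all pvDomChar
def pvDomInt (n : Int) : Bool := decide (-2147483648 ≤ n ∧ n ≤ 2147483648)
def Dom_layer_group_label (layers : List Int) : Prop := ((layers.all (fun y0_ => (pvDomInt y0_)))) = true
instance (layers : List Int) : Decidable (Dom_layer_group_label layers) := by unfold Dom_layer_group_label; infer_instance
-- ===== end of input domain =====

-- B replaces A's stateful merge scan by a set-membership characterisation of run boundaries: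
-- a value starts a run iff v-1 is not in the set and ends one iff v+1 is not; the two filtered
-- lists are zipped and formatted (objective: alternative).


-- ===== PORT A =====
-- A-side helpers: the f-string segment "{start}" / "{start}to{prev}" and the loop body
def fmtA (start prev : Int) : String :=
  if start = prev then PySem.Int.toStr start
  else PySem.Int.toStr start ++ "to" ++ PySem.Int.toStr prev

-- loop state = (segments, start, prev)
def stepA (acc : List String × Int × Int) (L : Int) : List String × Int × Int :=
  if L = acc.2.2 + 1 then (acc.1, acc.2.1, L)
  else (acc.1 ++ [fmtA acc.2.1 acc.2.2], L, L)

def layer_group_label (layers : List Int) : String :=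
  if layers = [] then "empty"
  else
    -- layers_sorted = sorted(set(layers)); [0] / [1:] rendered by the match (nonempty here)
    match PySem.List.sorted (PySem.Set.ofList layers) (fun x => x) false with
    | [] => ""  -- unreachable: sorted(set(·)) of a nonempty list is nonempty
    | s0 :: rest =>
      let res := rest.foldl stepA ([], s0, s0)
      PySem.Str.join "_" (res.1 ++ [fmtA res.2.1 res.2.2])

-- ===== PORT B =====
-- B-side helper (from Source B): format of one (start, end) pair in the final generator expression
def fmtB (p : Int × Int) : String :=
  if p.1 = p.2 then PySem.Int.toStr p.1
  else PySem.Int.toStr p.1 ++ "to" ++ PySem.Int.toStr p.2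

def layer_group_label_alt (layers : List Int) : String :=
  if layers = [] then "empty"
  else
    let s := PySem.Set.ofList layers
    let vals := PySem.List.sorted s (fun x => x) false
    let starts := vals.filter (fun v => !(PySem.Set.contains s (v - 1)))
    let ends := vals.filter (fun v => !(PySem.Set.contains s (v + 1)))
    PySem.Str.join "_" ((starts.zip ends).map fmtB)

-- ===== PRECONDITION & SPEC =====
def Spec_layer_group_label (layers : List Int) (out : String) : Prop := out = layer_group_label_alt layers
instance (layers : List Int) (out : String) : Decidable (Spec_layer_group_label layers out) := by unfold Spec_layer_group_label; infer_instance

-- ===== CLAIM (what is proved, stated in full; the proofs are below) =====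
def Claim_equal_layer_group_label : Prop := ∀ (layers : List Int), Dom_layer_group_label layers → Spec_layer_group_label layers (layer_group_label layers)

-- ===== LEMMAS AND PROOFS =====

-- The run decomposition A's scan computes: maximal consecutive (start, end) pairs.
def runsOf (start prev : Int) : List Int → List (Int × Int)
  | [] => [(start, prev)]
  | L :: rs => if L = prev + 1 then runsOf start L rs
               else (start, prev) :: runsOf L L rs

-- run starts after the first one (the break points) and the run ends, as standalone functions
def breaks (prev : Int) : List Int → List Int
  | [] => []
  | v :: xs => if v = prev + 1 then breaks v xs else v :: breaks v xs

def endsOf (prev : Int) : List Int → List Int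
  | [] => [prev]
  | v :: xs => if v = prev + 1 then endsOf v xs else prev :: endsOf v xs

theorem fmtB_mk (a b : Int) : fmtB (a, b) = fmtA a b := rfl

-- A's fold produces exactly the formatted runs.
theorem foldA_spec (L : List Int) : ∀ (segs : List String) (start prev : Int),
    (L.foldl stepA (segs, start, prev)).1
      ++ [fmtA (L.foldl stepA (segs, start, prev)).2.1 (L.foldl stepA (segs, start, prev)).2.2]
    = segs ++ (runsOf start prev L).map fmtB := by
  induction L with
  | nil => intro segs start prev; simp [runsOf, fmtB_mk]
  | cons x rs ih =>
    intro segs start prev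
    by_cases hx : x = prev + 1
    · simp [List.foldl_cons, stepA, hx, runsOf, ih]
    · simp [List.foldl_cons, stepA, hx, runsOf, ih, fmtB_mk]

theorem runs_fst (L : List Int) : ∀ start prev,
    (runsOf start prev L).map Prod.fst = start :: breaks prev L := by
  induction L with
  | nil => intro start prev; simp [runsOf, breaks]
  | cons x rs ih =>
    intro start prev
    by_cases hx : x = prev + 1 <;> simp [runsOf, breaks, hx, ih]

theorem runs_snd (L : List Int) : ∀ start prev,
    (runsOf start prev L).map Prod.snd = endsOf prev L := by
  induction L with
  | nil => intro start prev; simp [runsOf, endsOf]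
  | cons x rs ih =>
    intro start prev
    by_cases hx : x = prev + 1 <;> simp [runsOf, endsOf, hx, ih]

-- zip of the two projections recovers the pair list
theorem zip_proj {α β : Type} (l : List (α × β)) : (l.map Prod.fst).zip (l.map Prod.snd) = l := by
  induction l with
  | nil => rfl
  | cons p ps ih => simp [ih]

-- Filtering a strictly increasing tail with "v-1 not a member" keeps exactly the break points,
-- where m is any membership test agreeing with the suffix above prev and true at prev.
theorem filter_starts (xs : List Int) : ∀ (prev : Int) (m : Int → Bool),
    List.Pairwise (· < ·) (prev :: xs) →
    m prev = true →
    (∀ w : Int, prev < w → (m w = true ↔ w ∈ xs)) →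
    xs.filter (fun v => !(m (v - 1))) = breaks prev xs := by
  induction xs with
  | nil => intro prev m _ _ _; simp [breaks]
  | cons v vs ih =>
    intro prev m hpw hmp hloc
    have hlt : prev < v := (List.pairwise_cons.1 hpw).1 v (by simp)
    have hpw' : List.Pairwise (· < ·) (v :: vs) := (List.pairwise_cons.1 hpw).2
    have hmv : m v = true := (hloc v hlt).2 (by simp)
    have hloc' : ∀ w : Int, v < w → (m w = true ↔ w ∈ vs) := by
      intro w hw
      rw [hloc w (lt_trans hlt hw), List.mem_cons]
      constructor
      · intro h; rcases h with h | h
        · exact absurd h (by omega)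
        · exact h
      · exact Or.inr
    by_cases hv : v = prev + 1
    · have hm1 : m (v - 1) = true := by rw [show v - 1 = prev by omega]; exact hmp
      rw [List.filter_cons_of_neg (by simp [hm1]),
          show breaks prev (v :: vs) = breaks v vs by simp [breaks, hv]]
      exact ih v m hpw' hmv hloc'
    · have hm1 : m (v - 1) = false := by
        cases hm : m (v - 1) with
        | false => rfl
        | true =>
          have hmem := (hloc (v - 1) (by omega)).1 hm
          rw [List.mem_cons] at hmem
          rcases hmem with h' | h'
          · omega
          · have := (List.pairwise_cons.1 hpw').1 _ h'; omega
      rw [List.filter_cons_of_pos (by simp [hm1]),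
          show breaks prev (v :: vs) = v :: breaks v vs by simp [breaks, hv]]
      exact congrArg (v :: ·) (ih v m hpw' hmv hloc')

-- Filtering a strictly increasing list with "v+1 not a member" keeps exactly the run ends.
theorem filter_ends (xs : List Int) : ∀ (prev : Int) (m : Int → Bool),
    List.Pairwise (· < ·) (prev :: xs) →
    (∀ w : Int, prev < w → (m w = true ↔ w ∈ xs)) →
    (prev :: xs).filter (fun v => !(m (v + 1))) = endsOf prev xs := by
  induction xs with
  | nil =>
    intro prev m _ hloc
    have hm1 : m (prev + 1) = false := by
      cases hm : m (prev + 1) with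
      | false => rfl
      | true => exact absurd ((hloc (prev + 1) (by omega)).1 hm) (by simp)
    rw [List.filter_cons_of_pos (by simp [hm1])]
    simp [endsOf]
  | cons v vs ih =>
    intro prev m hpw hloc
    have hlt : prev < v := (List.pairwise_cons.1 hpw).1 v (by simp)
    have hpw' : List.Pairwise (· < ·) (v :: vs) := (List.pairwise_cons.1 hpw).2
    have hloc' : ∀ w : Int, v < w → (m w = true ↔ w ∈ vs) := by
      intro w hw
      rw [hloc w (lt_trans hlt hw), List.mem_cons]
      constructor
      · intro h; rcases h with h | h
        · exact absurd h (by omega)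
        · exact h
      · exact Or.inr
    by_cases hv : v = prev + 1
    · have hm1 : m (prev + 1) = true := (hloc (prev + 1) (by omega)).2 (by simp [hv])
      rw [List.filter_cons_of_neg (by simp [hm1]),
          show endsOf prev (v :: vs) = endsOf v vs by simp [endsOf, hv]]
      exact ih v m hpw' hloc'
    · have hm1 : m (prev + 1) = false := by
        cases hm : m (prev + 1) with
        | false => rfl
        | true =>
          have hmem := (hloc (prev + 1) (by omega)).1 hm
          rw [List.mem_cons] at hmem
          rcases hmem with h' | h'
          · omega
          · have := (List.pairwise_cons.1 hpw').1 _ h'; omega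
      rw [List.filter_cons_of_pos (by simp [hm1]),
          show endsOf prev (v :: vs) = prev :: endsOf v vs by simp [endsOf, hv]]
      exact congrArg (prev :: ·) (ih v m hpw' hloc')

-- ===== VERDICT (by name: the statement is the Claim_ definition above) =====
theorem layer_group_label_spec : Claim_equal_layer_group_label := by
  intro layers _
  unfold Spec_layer_group_label layer_group_label layer_group_label_alt
  by_cases hnil : layers = []
  · simp [hnil]
  · simp only [hnil, ite_false]
    cases h : PySem.List.sorted (PySem.Set.ofList layers) (fun x => x) false with
    | nil => rfl
    | cons s0 rest =>
      have hpwV : List.Pairwise (· < ·) (s0 :: rest) := by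
        have := PySem.List.sorted_ofList_pairwise_lt (xs := layers)
        rwa [h] at this
      have hmem : ∀ w : Int,
          (PySem.Set.contains (PySem.Set.ofList layers) w = true ↔ w ∈ s0 :: rest) := by
        intro w
        rw [PySem.Set.contains_iff, ← PySem.List.mem_sorted (key := fun x => x) (rev := false), h]
      have hloc : ∀ w : Int, s0 < w →
          (PySem.Set.contains (PySem.Set.ofList layers) w = true ↔ w ∈ rest) := by
        intro w hw
        rw [hmem w, List.mem_cons]
        constructor
        · intro h'; rcases h' with h' | h'
          · exact absurd h' (by omega)
          · exact h'
        · exact Or.inr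
      have hms0 : PySem.Set.contains (PySem.Set.ofList layers) s0 = true :=
        (hmem s0).2 (by simp)
      have hm1 : PySem.Set.contains (PySem.Set.ofList layers) (s0 - 1) = false := by
        cases hm : PySem.Set.contains (PySem.Set.ofList layers) (s0 - 1) with
        | false => rfl
        | true =>
          have hmem1 := (hmem (s0 - 1)).1 hm
          rw [List.mem_cons] at hmem1
          rcases hmem1 with h' | h'
          · omega
          · have := (List.pairwise_cons.1 hpwV).1 _ h'; omega
      have hstarts : (s0 :: rest).filter
            (fun v => !(PySem.Set.contains (PySem.Set.ofList layers) (v - 1)))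
          = (runsOf s0 s0 rest).map Prod.fst := by
        rw [List.filter_cons_of_pos (by simp only [hm1, Bool.not_false]),
            filter_starts rest s0 _ hpwV hms0 hloc, runs_fst]
      have hends : (s0 :: rest).filter
            (fun v => !(PySem.Set.contains (PySem.Set.ofList layers) (v + 1)))
          = (runsOf s0 s0 rest).map Prod.snd := by
        rw [filter_ends rest s0 _ hpwV hloc, runs_snd]
      show PySem.Str.join "_"
          ((List.foldl stepA ([], s0, s0) rest).1
            ++ [fmtA (List.foldl stepA ([], s0, s0) rest).2.1
                     (List.foldl stepA ([], s0, s0) rest).2.2])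
        = _
      rw [foldA_spec rest [] s0 s0, List.nil_append, hstarts, hends, zip_proj]
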